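-- pv_equiv track=rewrite | github.com/cccorn/Q-ATPG | lib/libspd.py | is_commute
-- ===== SOURCE A (Python) =====
-- def int2bin(x):
--     if x==0:
--         return []
--     result=[]
--     while(True):
--         if x==0:
--             break
--         else:
--             result.insert(0,x%2)
--         x=x//2
--     return result
--
-- def is_commute(x,y):
--     a=int2bin(x)
--     b=int2bin(y)
--     if len(a)%2==1:
--         a.insert(0,0)
--     if len(b)%2==1:
--         b.insert(0,0)
--     result=0
--     n=min(len(a),len(b))
--     for ii in range(n//2):
--         result+=(a[-1-2*ii]*b[-1-(2*ii+1)]+a[-1-(2*ii+1)]*b[-1-2*ii])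
--     return (not result%2)
-- ===== SOURCE B (Python) =====
-- def is_commute(x, y):
--     result = 0
--     while x > 0 and y > 0:
--         result += (x % 2) * ((y // 2) % 2) + ((x // 2) % 2) * (y % 2)
--         x //= 4
--         y //= 4
--     return not result % 2
-- ===== Notes on version B (the rewrite author's own statement) =====
-- stated objective: simpler
-- what changed: B drops int2bin, the bit lists, the parity padding and the negative back-indexing entirely: it consumes one symplectic pair per iteration straight off the integers (low two bits of each, then shift both down by //=4) in a single arithmetic loop.
import Mathlib
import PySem

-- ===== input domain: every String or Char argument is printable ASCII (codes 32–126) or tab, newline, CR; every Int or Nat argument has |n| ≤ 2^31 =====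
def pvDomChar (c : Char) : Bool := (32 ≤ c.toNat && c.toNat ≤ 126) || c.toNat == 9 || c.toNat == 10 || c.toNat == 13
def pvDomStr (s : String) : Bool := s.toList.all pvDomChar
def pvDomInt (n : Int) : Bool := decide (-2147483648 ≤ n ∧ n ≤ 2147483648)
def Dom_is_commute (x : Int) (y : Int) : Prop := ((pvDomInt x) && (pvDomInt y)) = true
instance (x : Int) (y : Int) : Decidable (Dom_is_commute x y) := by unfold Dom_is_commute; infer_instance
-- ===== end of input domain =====

-- B replaces A's bit-list construction (int2bin + padding + negative back-indexing) by one
-- arithmetic loop consuming a symplectic bit pair per iteration; objective: simpler.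

-- ===== PORT A =====
-- while-loop of int2bin: Python diverges for x < 0 (excluded by Pre_); the x ≤ 0 guard only
-- makes the recursion total there, for x ≥ 0 it is exactly Python's 'if x==0: break'.
def int2binGo (x : Int) (result : List Int) : List Int :=
  if h : x ≤ 0 then result
  else int2binGo (PySem.Int.floordiv x 2) (PySem.Int.mod x 2 :: result)
termination_by x.toNat
decreasing_by
  have h2 : PySem.Int.floordiv x 2 = x / 2 := PySem.Int.floordiv_eq_ediv_of_pos (by omega)
  rw [h2]; omega

def int2bin (x : Int) : List Int :=
  if x = 0 then [] else int2binGo x []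

def is_commute (x : Int) (y : Int) : Bool :=
  let a := int2bin x
  let b := int2bin y
  let a := if a.length % 2 == 1 then (0 : Int) :: a else a
  let b := if b.length % 2 == 1 then (0 : Int) :: b else b
  let n : Int := min (a.length : Int) (b.length : Int)
  -- a[-1-2*ii] etc.: indices are always in range here, so pyGetD with default 0 is exact
  let result : Int :=
    (PySem.List.pyRange 0 (PySem.Int.floordiv n 2) 1).foldl
      (fun r ii =>
        r + (PySem.List.pyGetD a (-1 - 2*ii) 0 * PySem.List.pyGetD b (-1 - (2*ii+1)) 0
           + PySem.List.pyGetD a (-1 - (2*ii+1)) 0 * PySem.List.pyGetD b (-1 - 2*ii) 0)) 0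
  decide (PySem.Int.mod result 2 = 0)

-- ===== PORT B =====
def altGo (x : Int) (y : Int) (result : Int) : Int :=
  if h : 0 < x ∧ 0 < y then
    altGo (PySem.Int.floordiv x 4) (PySem.Int.floordiv y 4)
      (result + (PySem.Int.mod x 2 * PySem.Int.mod (PySem.Int.floordiv y 2) 2
               + PySem.Int.mod (PySem.Int.floordiv x 2) 2 * PySem.Int.mod y 2))
  else result
termination_by x.toNat
decreasing_by
  have h4 : PySem.Int.floordiv x 4 = x / 4 := PySem.Int.floordiv_eq_ediv_of_pos (by omega)
  rw [h4]; omega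

def is_commute_alt (x : Int) (y : Int) : Bool :=
  decide (PySem.Int.mod (altGo x y 0) 2 = 0)

-- ===== PRECONDITION & SPEC =====
-- Python A's int2bin loops forever on a negative argument (x//2 never reaches 0), so A
-- returns only on nonnegative inputs; Pre_ admits exactly those.
def Pre_is_commute (x : Int) (y : Int) : Prop := 0 ≤ x ∧ 0 ≤ y
instance (x : Int) (y : Int) : Decidable (Pre_is_commute x y) := by
  unfold Pre_is_commute; infer_instance

def pvWitness_is_commute : Int × Int := (6, 3)

def Spec_is_commute (x : Int) (y : Int) (out : Bool) : Prop := out = is_commute_alt x y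
instance (x : Int) (y : Int) (out : Bool) : Decidable (Spec_is_commute x y out) := by
  unfold Spec_is_commute; infer_instance

-- ===== CLAIM (what is proved, stated in full; the proofs are below) =====
def Claim_equal_is_commute : Prop :=
  ∀ (x : Int) (y : Int), Dom_is_commute x y → Pre_is_commute x y →
    Spec_is_commute x y (is_commute x y)

-- ===== LEMMAS AND PROOFS =====

-- little-endian binary digits of x (proof-side helper)
def digits (x : Int) : List Int :=
  if h : 0 < x then x % 2 :: digits (x / 2) else []
termination_by x.toNat
decreasing_by omega

-- bit k of x
def bit (x : Int) (k : Nat) : Int := (x / 2 ^ k) % 2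

-- the k-th symplectic pair term
def term (x y : Int) (k : Nat) : Int :=
  bit x (2*k) * bit y (2*k+1) + bit x (2*k+1) * bit y (2*k)

-- partial sums of the symplectic form
def F (x y : Int) : Nat → Int
  | 0 => 0
  | K+1 => F x y K + term x y K

-- the padded list built by A: front-pad with one 0 if the digit count is odd
def padded (x : Int) : List Int :=
  if (digits x).reverse.length % 2 == 1 then 0 :: (digits x).reverse
  else (digits x).reverse

theorem int2binGo_eq (x : Int) (res : List Int) :
    int2binGo x res = (digits x).reverse ++ res := by
  induction x, res using int2binGo.induct with
  | case1 x res h => rw [int2binGo, dif_pos h, digits, dif_neg (by omega)]; simp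
  | case2 x res h ih =>
    rw [PySem.Int.floordiv_eq_ediv_of_pos (by norm_num),
        PySem.Int.mod_eq_emod_of_pos (by norm_num)] at ih
    rw [int2binGo, dif_neg h,
        PySem.Int.floordiv_eq_ediv_of_pos (by norm_num),
        PySem.Int.mod_eq_emod_of_pos (by norm_num), ih]
    conv_rhs => rw [digits]
    rw [dif_pos (by omega)]
    simp

theorem int2bin_eq (x : Int) (hx : 0 ≤ x) : int2bin x = (digits x).reverse := by
  unfold int2bin
  by_cases h : x = 0
  · rw [if_pos h, h, digits, dif_neg (by omega)]; rfl
  · rw [if_neg h, int2binGo_eq]; simp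

theorem digits_getD (k : Nat) (x : Int) (hx : 0 ≤ x) :
    (digits x).getD k 0 = bit x k := by
  induction k generalizing x with
  | zero =>
    rw [digits]
    by_cases h : 0 < x
    · simp [h, bit]
    · have : x = 0 := by omega
      simp [this, bit]
  | succ k ih =>
    rw [digits]
    by_cases h : 0 < x
    · simp only [h, dif_pos, List.getD_cons_succ]
      rw [ih _ (by omega)]
      unfold bit
      rw [Int.ediv_ediv_of_nonneg (by norm_num)]
      congr 2
      rw [pow_succ]; ring
    · have : x = 0 := by omega
      simp [this, bit]

theorem digits_lt (x : Int) (hx : 0 ≤ x) : x < 2 ^ (digits x).length := by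
  induction x using digits.induct with
  | case1 x h ih =>
    rw [digits, dif_pos h]
    simp only [List.length_cons, pow_succ]
    have := ih (by omega)
    omega
  | case2 x h =>
    rw [digits, dif_neg h]
    simp; omega

theorem digits_length_le (x : Int) (k : Nat) (hx : 0 ≤ x) (h : x < 2 ^ k) :
    (digits x).length ≤ k := by
  induction x using digits.induct generalizing k with
  | case1 x hpos ih =>
    rw [digits, dif_pos hpos]
    match k with
    | 0 => simp at h; omega
    | k+1 =>
      simp only [List.length_cons, Nat.add_le_add_iff_right]
      exact ih (by omega) (k := k) (by rw [pow_succ] at h; omega)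
  | case2 x hpos => rw [digits, dif_neg hpos]; simp

theorem bit_zero_of_lt (x : Int) (k : Nat) (hx : 0 ≤ x) (h : x < 2 ^ k) :
    bit x k = 0 := by
  unfold bit
  rw [Int.ediv_eq_zero_of_lt hx h]; rfl

theorem bit_shift (x : Int) (k : Nat) :
    bit (x / 4) k = bit x (k + 2) := by
  unfold bit
  rw [Int.ediv_ediv_of_nonneg (by norm_num)]
  congr 2
  rw [pow_add]; ring

theorem term_zero_left (x y : Int) (k : Nat) (hx : 0 ≤ x)
    (h : (digits x).length ≤ 2*k) : term x y k = 0 := by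
  have hlt := digits_lt x hx
  have h1 : bit x (2*k) = 0 :=
    bit_zero_of_lt x _ hx (lt_of_lt_of_le hlt (pow_le_pow_right₀ (by norm_num) h))
  have h2 : bit x (2*k+1) = 0 :=
    bit_zero_of_lt x _ hx (lt_of_lt_of_le hlt (pow_le_pow_right₀ (by norm_num) (by omega)))
  unfold term
  rw [h1, h2]; ring

theorem term_zero_right (x y : Int) (k : Nat) (hy : 0 ≤ y)
    (h : (digits y).length ≤ 2*k) : term x y k = 0 := by
  have hlt := digits_lt y hy
  have h1 : bit y (2*k) = 0 :=
    bit_zero_of_lt y _ hy (lt_of_lt_of_le hlt (pow_le_pow_right₀ (by norm_num) h))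
  have h2 : bit y (2*k+1) = 0 :=
    bit_zero_of_lt y _ hy (lt_of_lt_of_le hlt (pow_le_pow_right₀ (by norm_num) (by omega)))
  unfold term
  rw [h1, h2]; ring

theorem F_zero (x y : Int) (K : Nat) (h : x = 0 ∨ y = 0) : F x y K = 0 := by
  induction K with
  | zero => rfl
  | succ K ih =>
    simp only [F]
    rw [ih]
    rcases h with h | h <;> simp [h, term, bit]

theorem term_shift (x y : Int) (k : Nat) :
    term (x / 4) (y / 4) k = term x y (k + 1) := by
  unfold term
  rw [bit_shift, bit_shift, bit_shift, bit_shift]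
  ring_nf

theorem F_shift (x y : Int) (K : Nat) :
    F x y (K + 1) = term x y 0 + F (x / 4) (y / 4) K := by
  induction K with
  | zero => simp only [F]; ring
  | succ K ih =>
    have e1 : F x y (K+1+1) = F x y (K+1) + term x y (K+1) := rfl
    have e2 : F (x/4) (y/4) (K+1) = F (x/4) (y/4) K + term (x/4) (y/4) K := rfl
    rw [e1, e2, ih, term_shift]
    ring

theorem F_ext (x y : Int) (K K' : Nat) (hK : K ≤ K')
    (h : ∀ k, K ≤ k → k < K' → term x y k = 0) : F x y K' = F x y K := by
  induction K' with
  | zero => have : K = 0 := by omega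
            rw [this]
  | succ K' ih =>
    by_cases hE : K = K' + 1
    · rw [hE]
    · have e1 : F x y (K'+1) = F x y K' + term x y K' := rfl
      rw [e1, h K' (by omega) (by omega), ih (by omega)
            (fun k h1 h2 => h k h1 (by omega))]
      ring

theorem altGo_eq (K : Nat) (x y acc : Int) (hx : 0 ≤ x) (hy : 0 ≤ y)
    (hb : x < 4 ^ K) : altGo x y acc = acc + F x y K := by
  induction K generalizing x y acc with
  | zero =>
    rw [altGo, dif_neg (by simp at hb; omega)]; simp only [F]
    ring
  | succ K ih =>
    by_cases h : 0 < x ∧ 0 < y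
    · rw [altGo, dif_pos h,
          PySem.Int.floordiv_eq_ediv_of_pos (show (0:Int) < 4 by norm_num),
          PySem.Int.floordiv_eq_ediv_of_pos (show (0:Int) < 4 by norm_num),
          PySem.Int.floordiv_eq_ediv_of_pos (show (0:Int) < 2 by norm_num),
          PySem.Int.floordiv_eq_ediv_of_pos (show (0:Int) < 2 by norm_num),
          PySem.Int.mod_eq_emod_of_pos (by norm_num),
          PySem.Int.mod_eq_emod_of_pos (by norm_num),
          PySem.Int.mod_eq_emod_of_pos (by norm_num),
          PySem.Int.mod_eq_emod_of_pos (by norm_num)]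
      rw [ih (x / 4) (y / 4) _ (by omega) (by omega)
            (by rw [pow_succ] at hb; omega)]
      rw [F_shift]
      have h0 : bit x 0 = x % 2 := by unfold bit; norm_num
      have h1 : bit x 1 = x / 2 % 2 := by unfold bit; norm_num
      have h0y : bit y 0 = y % 2 := by unfold bit; norm_num
      have h1y : bit y 1 = y / 2 % 2 := by unfold bit; norm_num
      unfold term
      rw [h0, h1, h0y, h1y]
      ring_nf
    · rw [altGo, dif_neg h, F_zero _ _ _ (by omega)]
      ring

theorem getD_append_zeros (l p : List Int) (j : Nat) (hp : ∀ z ∈ p, z = 0) :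
    (l ++ p).getD j 0 = l.getD j 0 := by
  by_cases h : j < l.length
  · rw [List.getD_eq_getElem?_getD, List.getElem?_append_left h,
        ← List.getD_eq_getElem?_getD]
  · rw [List.getD_eq_getElem?_getD, List.getElem?_append_right (by omega)]
    have hgl : l.getD j 0 = 0 := by
      rw [List.getD_eq_getElem?_getD, List.getElem?_eq_none (by omega)]; rfl
    rw [hgl]
    by_cases h2 : j - l.length < p.length
    · rw [List.getElem?_eq_getElem h2]
      simpa using hp _ (List.getElem_mem h2)
    · rw [List.getElem?_eq_none (by omega)]; rfl

theorem back_getD (xs : List Int) (j : Nat) (hj : j < xs.length) :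
    PySem.List.pyGetD xs (-1 - (j:Int)) 0 = xs.reverse.getD j 0 := by
  have e : (-1 - (j:Int)) = -((j+1 : Nat) : Int) := by push_cast; ring
  rw [e, PySem.List.pyGetD_neg_natCast _ _ _ (by omega) (by omega)]
  rw [List.getD_eq_getElem?_getD, List.getElem?_eq_getElem (by simp; omega)]
  simp only [Option.getD_some]
  rw [List.getElem_reverse]
  congr 1
  omega

theorem padded_len (x : Int) :
    (padded x).length % 2 = 0 ∧ (digits x).length ≤ (padded x).length ∧
      (padded x).length ≤ (digits x).length + 1 := by
  by_cases h : (digits x).length % 2 = 1 <;> simp [padded, h] <;> omega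

theorem padded_getD (x : Int) (hx : 0 ≤ x) (j : Nat) (hj : j < (padded x).length) :
    PySem.List.pyGetD (padded x) (-1 - (j:Int)) 0 = bit x j := by
  rw [back_getD _ _ hj]
  have hrev : (padded x).reverse
      = digits x ++ (if (digits x).length % 2 = 1 then [0] else []) := by
    by_cases h : (digits x).length % 2 = 1 <;> simp [padded, h]
  rw [hrev, getD_append_zeros]
  · exact digits_getD j x hx
  · intro z hz
    by_cases h : (digits x).length % 2 = 1 <;> simp [h] at hz
    exact hz

theorem foldl_eq_F (g : Nat → Int) (m : Nat) (x y : Int)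
    (hg : ∀ k, k < m → g k = term x y k) :
    (List.range m).foldl (fun r k => r + g k) 0 = F x y m := by
  induction m with
  | zero => rfl
  | succ m ih =>
    rw [List.range_succ, List.foldl_append,
        ih (fun k hk => hg k (by omega))]
    simp only [List.foldl_cons, List.foldl_nil]
    have e1 : F x y (m+1) = F x y m + term x y m := rfl
    rw [e1, hg m (by omega)]

theorem A_eq_F (x y : Int) (hx : 0 ≤ x) (hy : 0 ≤ y)
    (hxb : x ≤ 2^31) (hyb : y ≤ 2^31) :
    is_commute x y = decide (PySem.Int.mod (F x y 16) 2 = 0) := by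
  have key : is_commute x y = decide (PySem.Int.mod
      ((PySem.List.pyRange 0
          (PySem.Int.floordiv (min ((padded x).length : Int) ((padded y).length : Int)) 2) 1).foldl
        (fun r ii =>
          r + (PySem.List.pyGetD (padded x) (-1 - 2*ii) 0 * PySem.List.pyGetD (padded y) (-1 - (2*ii+1)) 0
             + PySem.List.pyGetD (padded x) (-1 - (2*ii+1)) 0 * PySem.List.pyGetD (padded y) (-1 - 2*ii) 0)) 0) 2 = 0) := by
    unfold is_commute padded
    rw [int2bin_eq x hx, int2bin_eq y hy]
  rw [key]
  -- name the two even padded lengths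
  obtain ⟨hpx, hlx, hlx'⟩ := padded_len x
  obtain ⟨hpy, hly, hly'⟩ := padded_len y
  have hLx : (digits x).length ≤ 32 := digits_length_le x 32 hx (by norm_num; omega)
  have hLy : (digits y).length ≤ 32 := digits_length_le y 32 hy (by norm_num; omega)
  set mn : Nat := min (padded x).length (padded y).length with hmn
  have hmin : min ((padded x).length : Int) ((padded y).length : Int) = (mn : Int) := by
    rw [hmn]; push_cast [Nat.cast_min]; rfl
  have hfd : PySem.Int.floordiv (mn : Int) 2 = ((mn / 2 : Nat) : Int) := by
    rw [PySem.Int.floordiv_eq_ediv_of_pos (by norm_num)]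
    exact_mod_cast (Int.natCast_div mn 2).symm
  rw [hmin, hfd, PySem.List.pyRange_one]
  have htn : (((mn / 2 : Nat) : Int) - 0).toNat = mn / 2 := by omega
  rw [htn]
  simp only [List.foldl_map]
  rw [foldl_eq_F _ (mn / 2) x y ?hg]
  · -- extend the sum from mn/2 to 16
    rw [F_ext x y (mn / 2) 16 (by omega) ?hv]
    case hv =>
      intro k hk1 hk2
      by_cases hab : (padded x).length ≤ (padded y).length
      · exact term_zero_left x y k hx (by omega)
      · exact term_zero_right x y k hy (by omega)
  case hg =>
    intro k hk
    have e0 : (0 : Int) + (k : Int) = (k : Int) := by ring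
    have h1 : -1 - 2*((0:Int) + (k : Int)) = -1 - ((2*k : Nat) : Int) := by push_cast; ring
    have h2 : -1 - (2*((0:Int) + (k : Int)) + 1) = -1 - ((2*k+1 : Nat) : Int) := by push_cast; ring
    rw [h1, h2,
        padded_getD x hx (2*k) (by omega),
        padded_getD x hx (2*k+1) (by omega),
        padded_getD y hy (2*k) (by omega),
        padded_getD y hy (2*k+1) (by omega)]
    rfl

-- ===== VERDICT (by name: the statement is the Claim_ definition above) =====
theorem is_commute_spec : Claim_equal_is_commute := by
  intro x y hd hp
  obtain ⟨hx, hy⟩ := hp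
  have hdom : x ≤ 2^31 ∧ y ≤ 2^31 := by
    simp [Dom_is_commute, pvDomInt] at hd; omega
  unfold Spec_is_commute is_commute_alt
  rw [A_eq_F x y hx hy hdom.1 hdom.2,
      altGo_eq 16 x y 0 hx hy (by omega), zero_add]
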